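-- pv_equiv track=rewrite | github.com/rngrhn4114/Algorithm-SeoyeonLee | 프로그래머스/0/181932. 코드 처리하기/코드 처리하기.py | solution
-- ===== SOURCE A (Python) =====
-- def solution(code):
--     answer = ''
--     mode = 0
--     for i in range(len(code)):
--         if mode == 0:
--             if code[i] != "1":
--                 if i % 2 == 0:
--                     answer += code[i]
--             elif code[i] == "1":
--                 mode = 1
--             elif answer == "":
--                 answer = "EMPTY"
--         elif mode == 1:
--             if code[i] != "1":
--                 if i % 2 == 1:
--                     answer += code[i]
--             elif code[i] == "1":
--                 mode = 0
--     if answer == "":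
--         answer = "EMPTY"
--     return answer
-- ===== SOURCE B (Python) =====
-- def solution(code):
--     # A char survives iff it is not '1' and an even number of non-'1' chars precede it
--     # (i % 2 == ones_before % 2  <=>  (i - ones_before) % 2 == 0, and i - ones_before is
--     # the count of preceding non-'1' chars): so delete the '1's and keep every 2nd char.
--     kept = code.replace('1', '')[::2]
--     return kept or 'EMPTY'
-- ===== Notes on version B (the rewrite author's own statement) =====
-- stated objective: simpler
-- what changed: Replaces A's index/mode state machine with the observation that a char is kept iff it is not the toggle char and an even number of kept-candidate chars precede it, so B is one replace plus one step-2 slice.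
import Mathlib
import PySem

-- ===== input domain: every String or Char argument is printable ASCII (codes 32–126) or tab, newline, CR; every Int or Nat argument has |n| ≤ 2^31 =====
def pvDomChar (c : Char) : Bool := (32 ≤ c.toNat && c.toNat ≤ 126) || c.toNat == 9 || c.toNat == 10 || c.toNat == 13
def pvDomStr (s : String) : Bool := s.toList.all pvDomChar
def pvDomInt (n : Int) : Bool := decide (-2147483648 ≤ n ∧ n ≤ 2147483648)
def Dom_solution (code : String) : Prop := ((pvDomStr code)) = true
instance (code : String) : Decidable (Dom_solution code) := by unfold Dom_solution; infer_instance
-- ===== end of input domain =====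

-- B drops A's index/mode state machine: a char is kept iff it is not '1' and an even
-- number of non-'1' chars precede it, so B is code.replace('1','')[::2] or 'EMPTY' (simpler, same cost).

-- ===== PORT A =====
-- one loop step of A: state (answer, mode), input (i, code[i])
def pvStepA (st : String × Int) (ic : Int × Char) : String × Int :=
  if st.2 == 0 then
    if ic.2 != '1' then
      (if PySem.Int.mod ic.1 2 == 0 then (st.1.push ic.2, st.2) else st)
    else if ic.2 == '1' then (st.1, 1)
    else if st.1 == "" then ("EMPTY", st.2) else st
  else if st.2 == 1 then
    if ic.2 != '1' then
      (if PySem.Int.mod ic.1 2 == 1 then (st.1.push ic.2, st.2) else st)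
    else if ic.2 == '1' then (st.1, 0) else st
  else st

def solution (code : String) : String :=
  let cs := code.toList
  -- for i in range(len(code)): ...  (code[i] read via pyGetD; i is always in range)
  let st := (PySem.List.pyRange 0 (PySem.List.len cs) 1).foldl
    (fun st i => pvStepA st (i, PySem.List.pyGetD cs i ' ')) ("", 0)
  if st.1 == "" then "EMPTY" else st.1

-- ===== PORT B =====
def solution_alt (code : String) : String :=
  -- kept = code.replace('1', '')[::2]   (step-2 slice never raises: step ≠ 0)
  let kept := (PySem.Str.slice? (PySem.Str.replace code "1" "") none none 2).getD ""
  -- return kept or 'EMPTY'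
  if kept == "" then "EMPTY" else kept

-- ===== PRECONDITION & SPEC =====
def Spec_solution (code : String) (out : String) : Prop := out = solution_alt code
instance (code : String) (out : String) : Decidable (Spec_solution code out) := by unfold Spec_solution; infer_instance

-- ===== CLAIM (what is proved, stated in full; the proofs are below) =====
def Claim_equal_solution : Prop := ∀ (code : String), Dom_solution code → Spec_solution code (solution code)

-- ===== LEMMAS AND PROOFS =====

-- Bool parity as a Python 0/1 int
def pvB (b : Bool) : Int := if b then 1 else 0

-- the kept characters, given the parity p of the current index and the mode/ones parity m
def pvG : List Char → Bool → Bool → List Char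
  | [], _, _ => []
  | c :: t, p, m =>
    if c = '1' then pvG t (!p) (!m)
    else if p = m then c :: pvG t (!p) m else pvG t (!p) m

-- every other element, starting with the first (what the step-2 slice computes)
def pvEO : List Char → List Char
  | [] => []
  | [a] => [a]
  | a :: _ :: t => a :: pvEO t

-- alternating filter: keep the head iff the flag is set
def pvE : List Char → Bool → List Char
  | [], _ => []
  | c :: t, b => if b then c :: pvE t false else pvE t true

theorem pvParity_succ (k : Nat) : decide ((k+1) % 2 = 1) = !decide (k % 2 = 1) := by
  rcases Nat.mod_two_eq_zero_or_one k with h | h <;> simp [Nat.add_mod, h]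

theorem pvStepA_eval (acc : String) (m : Bool) (k : Nat) (c : Char) :
    pvStepA (acc, pvB m) ((k : Int), c) =
      (if c = '1' then (acc, pvB (!m))
       else if decide (k % 2 = 1) = m then (acc.push c, pvB m) else (acc, pvB m)) := by
  rcases Nat.mod_two_eq_zero_or_one k with hk | hk <;>
    cases m <;> by_cases hc : c = '1' <;>
      simp [pvStepA, pvB, hc, hk] <;>
        (intro h; exfalso; omega)

theorem pvA2 (cs : List Char) : ∀ (k : Nat) (acc : String) (mo : Int) (m : Bool),
    mo = pvB m →
    ((PySem.List.enumerate cs (k : Int)).foldl pvStepA (acc, mo)).1.toList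
      = acc.toList ++ pvG cs (decide (k % 2 = 1)) m := by
  induction cs with
  | nil => intro k acc mo m hm; simp [PySem.List.enumerate_nil, pvG]
  | cons c t ih =>
    intro k acc mo m hm
    subst hm
    rw [PySem.List.enumerate_cons]
    simp only [List.foldl_cons]
    have hk1 : ((k : Int) + 1) = ((k + 1 : Nat) : Int) := by push_cast; ring
    rw [hk1]
    by_cases hc : c = '1'
    · have hs : pvStepA (acc, pvB m) ((k : Int), c) = (acc, pvB (!m)) := by
        rw [pvStepA_eval]; simp [hc]
      rw [hs, ih (k+1) acc _ (!m) rfl]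
      simp [pvG, hc, pvParity_succ]
    · by_cases hp : decide (k % 2 = 1) = m
      · have hs : pvStepA (acc, pvB m) ((k : Int), c) = (acc.push c, pvB m) := by
          rw [pvStepA_eval]; simp [hc, hp]
        rw [hs, ih (k+1) (acc.push c) _ m rfl]
        simp [pvG, hc, hp, pvParity_succ]
      · have hs : pvStepA (acc, pvB m) ((k : Int), c) = (acc, pvB m) := by
          rw [pvStepA_eval]; simp [hc, hp]
        rw [hs, ih (k+1) acc _ m rfl]
        simp [pvG, hc, hp, pvParity_succ]

-- the "p = m" flag flips exactly on a kept (non-'1') char: pvG is the alternating filter of the '1'-free list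
theorem pvG_eq_pvE (cs : List Char) : ∀ (p m : Bool),
    pvG cs p m = pvE (cs.filter (fun c => c != '1')) (p == m) := by
  induction cs with
  | nil => intro p m; simp [pvG, pvE]
  | cons c t ih =>
    intro p m
    by_cases hc : c = '1'
    · have : ((!p) == (!m)) = (p == m) := by cases p <;> cases m <;> rfl
      simp [pvG, hc, ih, this]
    · by_cases hp : p = m
      · have : ((!p) == m) = false := by cases m <;> simp [hp]
        simp [pvG, hc, hp, pvE, ih]
      · have h1 : (p == m) = false := by simpa using hp
        have h2 : ((!p) == m) = true := by cases p <;> cases m <;> simp_all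
        simp [pvG, hc, hp, pvE, ih, h1, h2]

theorem pvE_eq_pvEO (l : List Char) : pvE l true = pvEO l ∧ pvE l false = pvEO l.tail := by
  induction l with
  | nil => simp [pvE, pvEO]
  | cons c t ih =>
    constructor
    · have : pvEO (c :: t) = c :: pvEO t.tail := by
        cases t with
        | nil => rfl
        | cons b t' => rfl
      simp [pvE, ih.2, this]
    · simp [pvE, ih.1]

-- replace.go with old = "1", new = "": filtering out the '1's
theorem pvRep (fuel : Nat) : ∀ (l acc : List Char), l.length ≤ fuel →
    PySem.Chars.replace.go ['1'] [] fuel l acc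
      = acc.reverse ++ l.filter (fun c => c != '1') := by
  induction fuel with
  | zero =>
    intro l acc h
    have : l = [] := List.eq_nil_of_length_eq_zero (Nat.le_zero.mp h)
    subst this
    simp [PySem.Chars.replace.go]
  | succ fuel ih =>
    intro l acc h
    cases l with
    | nil => simp [PySem.Chars.replace.go]
    | cons c t =>
      rw [PySem.Chars.replace.go.eq_def]
      by_cases hc : c = '1'
      · have hpre : List.isPrefixOf ['1'] (c :: t) = true := by simp [List.isPrefixOf, hc]
        simp only [hpre, if_true, List.length_cons, List.length_nil,
          List.drop_succ_cons, List.drop_zero, List.reverse_nil, List.nil_append]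
        rw [ih t acc (by simpa using Nat.le_of_succ_le_succ h)]
        simp [hc]
      · have hpre : List.isPrefixOf ['1'] (c :: t) = false := by
          simp [List.isPrefixOf]
          exact fun h' => hc h'.symm
        simp only [hpre]
        rw [ih t (c :: acc) (by simpa using Nat.le_of_succ_le_succ h)]
        simp [hc]

theorem pvReplace (cs : List Char) :
    PySem.Chars.replace cs ['1'] [] = cs.filter (fun c => c != '1') := by
  simp only [PySem.Chars.replace, List.isEmpty_cons, Bool.false_eq_true, if_false]
  simpa using pvRep cs.length cs [] le_rfl

-- the step-2 slice, expressed by the filterMap over range it unfolds to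
theorem pvFM (cs : List Char) :
    (List.range ((cs.length + 1) / 2)).filterMap (fun k => cs[2 * k]?) = pvEO cs := by
  induction cs using pvEO.induct with
  | case1 => simp [pvEO]
  | case2 a => simp [pvEO]
  | case3 a b t ih =>
    have hlen : ((a :: b :: t).length + 1) / 2 = (t.length + 1) / 2 + 1 := by
      simp [List.length_cons]; omega
    rw [hlen, List.range_succ_eq_map, List.filterMap_cons]
    have h0 : (a :: b :: t)[2 * 0]? = some a := rfl
    rw [h0, List.filterMap_map]
    have hf : ((fun k => (a :: b :: t)[2 * k]?) ∘ Nat.succ) = fun k => t[2 * k]? := by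
      funext k
      show (a :: b :: t)[2 * (k+1)]? = t[2*k]?
      rw [show 2 * (k+1) = (2 * k + 1) + 1 by ring]
      rfl
    rw [hf, ih]
    rfl

theorem pvSlice2 (cs : List Char) :
    PySem.List.slice? cs none none 2 = some (pvEO cs) := by
  have h2 : (2:Int) ≠ 0 := by norm_num
  simp only [PySem.List.slice?, PySem.List.sliceIndices, if_neg h2]
  have hlt : ¬ ((2:Int) < 0) := by norm_num
  simp only [hlt, if_false, if_true, (by norm_num : (0:Int) < 2)]
  have hcount : (if (0:Int) < (cs.length:Int) then (((cs.length : Int) - 0 + 2 - 1) / 2).toNat else 0)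
      = (cs.length + 1) / 2 := by
    by_cases h : (0:Int) < (cs.length:Int)
    · rw [if_pos h]; omega
    · rw [if_neg h]; omega
  rw [hcount, ← pvFM cs]
  congr 1
  apply List.filterMap_congr
  intro k _
  congr 1
  omega

-- ===== VERDICT (by name: the statement is the Claim_ definition above) =====
theorem solution_spec : Claim_equal_solution := by
  intro code _
  unfold Spec_solution solution solution_alt
  dsimp only
  -- B's value
  have hrep : (PySem.Str.replace code "1" "").toList
      = code.toList.filter (fun c => c != '1') := by
    rw [PySem.Str.toList_replace]
    exact pvReplace code.toList
  have hslice : PySem.Str.slice? (PySem.Str.replace code "1" "") none none 2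
      = some (String.ofList (pvEO (code.toList.filter (fun c => c != '1')))) := by
    simp only [PySem.Str.slice?, PySem.Chars.slice?_eq_listSlice?, hrep, pvSlice2, Option.map_some]
  rw [hslice]
  -- A's value
  have hconv : (PySem.List.pyRange 0 (PySem.List.len code.toList) 1).foldl
      (fun st i => pvStepA st (i, PySem.List.pyGetD code.toList i ' ')) (("", 0) : String × Int)
      = (PySem.List.enumerate code.toList 0).foldl pvStepA ("", 0) := by
    rw [PySem.List.enumerate_eq_map_pyRange code.toList ' ', List.foldl_map]
  rw [hconv]
  have hA := pvA2 code.toList 0 "" 0 false rfl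
  simp only [Nat.cast_zero, show decide ((0:Nat) % 2 = 1) = false from rfl,
    String.toList_empty, List.nil_append] at hA
  rw [pvG_eq_pvE, show (false == false) = true from rfl, (pvE_eq_pvEO _).1] at hA
  have hEq : ((PySem.List.enumerate code.toList 0).foldl pvStepA (("", 0) : String × Int)).1
      = String.ofList (pvEO (code.toList.filter (fun c => c != '1'))) := by
    apply String.toList_inj.mp
    rw [String.toList_ofList]
    exact hA
  rw [hEq]
  simp
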